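-- pv_equiv track=rewrite | github.com/Amritpal-001/100-days-of-code | EulerProject-solvedExamples/Euler 12 version 2.py | NumberOfDivisorsofNthTriagngleNumber
-- ===== SOURCE A (Python) =====
-- def NumberOfDivisorsofNthTriagngleNumber(N):
--     a = 0
--     z = 0
--     for i in range(1, N+1):
--         z += i
--     for i in range(1, z+1):
--         if z%i == 0:
--             a += 1
--     return(a)
-- ===== SOURCE B (Python) =====
-- def NumberOfDivisorsofNthTriagngleNumber(N):
--     if N < 1:
--         return 0
--     z = N * (N + 1) // 2
--     cnt = 0
--     i = 1
--     while i * i <= z: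
--         if z % i == 0:
--             cnt += 1 if i * i == z else 2
--         i += 1
--     return cnt
-- ===== Notes on version B (the rewrite author's own statement) =====
-- stated objective: faster
-- what changed: B replaces the summing loop by the closed-form triangle number and the full divisor scan up to z by trial division up to sqrt(z), counting divisor pairs.
import Mathlib
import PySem

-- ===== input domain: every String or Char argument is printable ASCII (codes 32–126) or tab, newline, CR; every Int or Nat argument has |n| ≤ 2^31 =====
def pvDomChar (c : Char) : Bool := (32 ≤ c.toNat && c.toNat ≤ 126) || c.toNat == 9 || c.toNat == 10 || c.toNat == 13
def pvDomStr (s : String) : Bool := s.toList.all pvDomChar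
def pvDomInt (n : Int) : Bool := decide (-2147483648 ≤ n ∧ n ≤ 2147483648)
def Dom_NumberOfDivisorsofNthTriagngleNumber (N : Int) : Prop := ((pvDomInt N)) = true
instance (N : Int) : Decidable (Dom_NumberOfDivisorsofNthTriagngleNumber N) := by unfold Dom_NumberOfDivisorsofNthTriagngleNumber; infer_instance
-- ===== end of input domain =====

-- B computes the triangle number by the closed form N(N+1)//2 and counts divisors by
-- trial division up to sqrt(z) (divisor pairs), instead of A's O(N) summing loop and O(z) full scan.


-- ===== PORT A =====
def NumberOfDivisorsofNthTriagngleNumber (N : Int) : Int :=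
  -- a = 0; z = 0; for i in range(1, N+1): z += i
  let z := (PySem.List.pyRange 1 (N + 1) 1).foldl (fun z i => z + i) 0
  -- for i in range(1, z+1): if z % i == 0: a += 1
  (PySem.List.pyRange 1 (z + 1) 1).foldl
    (fun a i => if PySem.Int.mod z i == 0 then a + 1 else a) 0

-- ===== PORT B =====
-- the 'while i*i <= z' loop of Source B
def pvLoopB (z i cnt : Int) : Int :=
  if h : i * i ≤ z then
    pvLoopB z (i + 1)
      (if PySem.Int.mod z i == 0 then (if i * i == z then cnt + 1 else cnt + 2) else cnt)
  else cnt
termination_by (z + 1 - i).toNat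
decreasing_by
  have h0 : 0 ≤ i * i := mul_self_nonneg i
  have h1 : i ≤ z ∨ i ≤ 0 := by
    rcases (by omega : i ≤ 0 ∨ 1 ≤ i) with h' | h'
    · exact Or.inr h'
    · exact Or.inl (le_trans (by nlinarith) h)
  omega

def NumberOfDivisorsofNthTriagngleNumber_alt (N : Int) : Int :=
  if N < 1 then 0
  else pvLoopB (PySem.Int.floordiv (N * (N + 1)) 2) 1 0

-- ===== PRECONDITION & SPEC =====
def Spec_NumberOfDivisorsofNthTriagngleNumber (N : Int) (out : Int) : Prop := out = NumberOfDivisorsofNthTriagngleNumber_alt N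
instance (N : Int) (out : Int) : Decidable (Spec_NumberOfDivisorsofNthTriagngleNumber N out) := by unfold Spec_NumberOfDivisorsofNthTriagngleNumber; infer_instance

-- ===== CLAIM (what is proved, stated in full; the proofs are below) =====
def Claim_equal_NumberOfDivisorsofNthTriagngleNumber : Prop := ∀ (N : Int), Dom_NumberOfDivisorsofNthTriagngleNumber N → Spec_NumberOfDivisorsofNthTriagngleNumber N (NumberOfDivisorsofNthTriagngleNumber N)

-- ===== LEMMAS AND PROOFS =====

-- Nat model of B's loop
def pvLoopN (z i : Nat) : Nat :=
  if i * i ≤ z then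
    (if z % i = 0 then (if i * i = z then 1 else 2) else 0) + pvLoopN z (i + 1)
  else 0
termination_by z + 1 - i
decreasing_by
  rename_i h
  have h1 : i ≤ z ∨ i = 0 := by
    rcases Nat.eq_zero_or_pos i with h' | h'
    · exact Or.inr h'
    · exact Or.inl (by nlinarith)
  omega

-- divisors of z still "reachable" from index i onwards
def pvT (z i : Nat) : Finset Nat :=
  (Finset.Icc 1 z).filter (fun d => d ∣ z ∧ ((i ≤ d ∧ d * d ≤ z) ∨ (z < d * d ∧ i ≤ z / d)))

lemma mem_pvT (z i d : Nat) :
    d ∈ pvT z i ↔ (1 ≤ d ∧ d ≤ z) ∧ d ∣ z ∧ ((i ≤ d ∧ d * d ≤ z) ∨ (z < d * d ∧ i ≤ z / d)) := by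
  unfold pvT
  rw [Finset.mem_filter, Finset.mem_Icc]

lemma pvLoopN_eq_card : ∀ z i : Nat, 1 ≤ i → 1 ≤ z → pvLoopN z i = (pvT z i).card := by
  intro z i
  refine pvLoopN.induct z (fun i => 1 ≤ i → 1 ≤ z → pvLoopN z i = (pvT z i).card) ?_ ?_ i
  · intro i h ih hi hz
    have hi0 : 0 < i := hi
    have ih' := ih (by omega) hz
    rw [pvLoopN, if_pos h]
    by_cases hdvd : z % i = 0
    · have hdvd' : i ∣ z := Nat.dvd_of_mod_eq_zero hdvd
      have hiz : i ≤ z := le_trans (by nlinarith) h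
      by_cases hsq : i * i = z
      · -- i is the square root of z: exactly one new divisor, i itself
        have hset : pvT z i = insert i (pvT z (i + 1)) := by
          ext d
          rw [Finset.mem_insert, mem_pvT, mem_pvT]
          constructor
          · rintro ⟨hmem, hdvd2, hcase⟩
            rcases hcase with ⟨hid, hdd⟩ | ⟨hzd, hizd⟩
            · by_cases hdi : d = i
              · exact Or.inl hdi
              · exact Or.inr ⟨hmem, hdvd2, Or.inl ⟨by omega, hdd⟩⟩
            · by_cases hstep : i + 1 ≤ z / d
              · exact Or.inr ⟨hmem, hdvd2, Or.inr ⟨hzd, hstep⟩⟩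
              · exfalso
                have hzi : z / d = i := by omega
                have hmul : z / d * d = z := Nat.div_mul_cancel hdvd2
                rw [hzi] at hmul
                have hdi : d = i := Nat.eq_of_mul_eq_mul_left hi0 (hmul.trans hsq.symm)
                subst hdi
                omega
          · rintro (rfl | ⟨hmem, hdvd2, hcase⟩)
            · exact ⟨⟨hi, hiz⟩, hdvd', Or.inl ⟨le_refl _, h⟩⟩
            · refine ⟨hmem, hdvd2, ?_⟩
              rcases hcase with ⟨hid, hdd⟩ | ⟨hzd, hizd⟩
              · exact Or.inl ⟨by omega, hdd⟩
              · exact Or.inr ⟨hzd, by omega⟩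
        have hnot : i ∉ pvT z (i + 1) := by
          rw [mem_pvT]
          rintro ⟨_, _, ⟨h1, _⟩ | ⟨h1, _⟩⟩ <;> omega
        rw [hset, Finset.card_insert_of_notMem hnot, ← ih']
        simp [hdvd, hsq]
        omega
      · -- i*i < z: two new divisors, i and z/i
        have hlt : i * i < z := lt_of_le_of_ne h hsq
        have hji : z / i * i = z := Nat.div_mul_cancel hdvd'
        have hij : i < z / i := Nat.lt_of_mul_lt_mul_right (a := i) (by omega)
        have hj1 : 1 ≤ z / i := by omega
        have hjz : z / i ≤ z := Nat.div_le_self z i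
        have hjj : z < z / i * (z / i) := by nlinarith
        have hzj : z / (z / i) = i := Nat.div_div_self hdvd' (by omega)
        have hjdvd : z / i ∣ z := ⟨i, hji.symm⟩
        have hset : pvT z i = insert i (insert (z / i) (pvT z (i + 1))) := by
          ext d
          rw [Finset.mem_insert, Finset.mem_insert, mem_pvT, mem_pvT]
          constructor
          · rintro ⟨hmem, hdvd2, hcase⟩
            rcases hcase with ⟨hid, hdd⟩ | ⟨hzd, hizd⟩
            · by_cases hdi : d = i
              · exact Or.inl hdi
              · exact Or.inr (Or.inr ⟨hmem, hdvd2, Or.inl ⟨by omega, hdd⟩⟩)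
            · by_cases hstep : i + 1 ≤ z / d
              · exact Or.inr (Or.inr ⟨hmem, hdvd2, Or.inr ⟨hzd, hstep⟩⟩)
              · have hzi : z / d = i := by omega
                have hmul : d * (z / d) = z := Nat.mul_div_cancel' hdvd2
                rw [hzi] at hmul
                exact Or.inr (Or.inl (Nat.eq_of_mul_eq_mul_right hi0 (hmul.trans hji.symm)))
          · rintro (rfl | rfl | ⟨hmem, hdvd2, hcase⟩)
            · exact ⟨⟨hi, hiz⟩, hdvd', Or.inl ⟨le_refl _, h⟩⟩
            · exact ⟨⟨hj1, hjz⟩, hjdvd, Or.inr ⟨hjj, by rw [hzj]⟩⟩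
            · refine ⟨hmem, hdvd2, ?_⟩
              rcases hcase with ⟨hid, hdd⟩ | ⟨hzd, hizd⟩
              · exact Or.inl ⟨by omega, hdd⟩
              · exact Or.inr ⟨hzd, by omega⟩
        have hnotj : z / i ∉ pvT z (i + 1) := by
          rw [mem_pvT]
          rintro ⟨_, _, ⟨h1, h2⟩ | ⟨h1, h2⟩⟩ <;> omega
        have hnoti : i ∉ insert (z / i) (pvT z (i + 1)) := by
          rw [Finset.mem_insert, mem_pvT]
          rintro (h1 | ⟨_, _, ⟨h1, h2⟩ | ⟨h1, h2⟩⟩) <;> omega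
        rw [hset, Finset.card_insert_of_notMem hnoti,
          Finset.card_insert_of_notMem hnotj, ← ih']
        simp [hdvd, hsq]
        omega
    · -- i does not divide z: no new divisor
      have hset : pvT z i = pvT z (i + 1) := by
        ext d
        rw [mem_pvT, mem_pvT]
        constructor
        · rintro ⟨hmem, hdvd2, hcase⟩
          refine ⟨hmem, hdvd2, ?_⟩
          have hdi : d ≠ i := by
            rintro rfl
            exact hdvd (Nat.eq_zero_of_dvd_of_lt hdvd2 |> fun _ => Nat.mod_eq_zero_of_dvd hdvd2)
          rcases hcase with ⟨hid, hdd⟩ | ⟨hzd, hizd⟩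
          · exact Or.inl ⟨by omega, hdd⟩
          · have hzdi : z / d ≠ i := by
              rintro hzi
              have : z / d ∣ z := ⟨d, (Nat.div_mul_cancel hdvd2).symm⟩
              rw [hzi] at this
              exact hdvd (Nat.mod_eq_zero_of_dvd this)
            exact Or.inr ⟨hzd, by omega⟩
        · rintro ⟨hmem, hdvd2, hcase⟩
          refine ⟨hmem, hdvd2, ?_⟩
          rcases hcase with ⟨hid, hdd⟩ | ⟨hzd, hizd⟩
          · exact Or.inl ⟨by omega, hdd⟩
          · exact Or.inr ⟨hzd, by omega⟩
      rw [hset, ← ih']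
      simp [hdvd]
  · intro i h hi _
    rw [pvLoopN, if_neg h]
    symm
    rw [Finset.card_eq_zero, Finset.eq_empty_iff_forall_notMem]
    intro d hd
    rw [mem_pvT] at hd
    obtain ⟨⟨hd1, hdz⟩, _, hcase⟩ := hd
    rcases hcase with ⟨hid, hdd⟩ | ⟨hzd, hizd⟩
    · exact h (le_trans (Nat.mul_le_mul hid hid) hdd)
    · have hlt : z / d < d := (Nat.div_lt_iff_lt_mul (by omega)).mpr hzd
      have hle : z / d * d ≤ z := Nat.div_mul_le_self z d
      exact h (by nlinarith)

lemma pvT_one (z : Nat) (hz : 1 ≤ z) :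
    pvT z 1 = (Finset.Icc 1 z).filter (fun d => d ∣ z) := by
  ext d
  rw [mem_pvT, Finset.mem_filter, Finset.mem_Icc]
  constructor
  · rintro ⟨hmem, hdvd, _⟩
    exact ⟨hmem, hdvd⟩
  · rintro ⟨⟨hd1, hdz⟩, hdvd⟩
    refine ⟨⟨hd1, hdz⟩, hdvd, ?_⟩
    by_cases hc : d * d ≤ z
    · exact Or.inl ⟨hd1, hc⟩
    · exact Or.inr ⟨by omega, (Nat.one_le_div_iff (by omega)).mpr hdz⟩

lemma pvCountA (z n : Nat) (hn : n ≤ z) :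
    (List.range n).countP (fun k => z % (k + 1) = 0) =
      ((Finset.Icc 1 n).filter (fun d => d ∣ z)).card := by
  induction n with
  | zero => simp
  | succ m ih =>
    rw [List.range_succ, List.countP_append, List.countP_singleton, ih (by omega)]
    have hIcc : Finset.Icc 1 (m + 1) = insert (m + 1) (Finset.Icc 1 m) := by
      ext x
      rw [Finset.mem_insert, Finset.mem_Icc, Finset.mem_Icc]
      omega
    rw [hIcc, Finset.filter_insert]
    by_cases hd : (m + 1) ∣ z
    · rw [if_pos hd, Finset.card_insert_of_notMem
        (by rw [Finset.mem_filter, Finset.mem_Icc]; omega)]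
      have hm : z % (m + 1) = 0 := Nat.eq_zero_of_dvd_of_lt hd |> fun _ => Nat.mod_eq_zero_of_dvd hd
      simp [hm]
    · have hm : z % (m + 1) ≠ 0 := fun hc => hd (Nat.dvd_of_mod_eq_zero hc)
      rw [if_neg hd]
      simp [hm]

lemma pvLoopB_eq (z : Nat) : ∀ i : Nat, ∀ cnt : Int,
    pvLoopB (z : Int) (i : Int) cnt = cnt + (pvLoopN z i : Int) := by
  intro i
  refine pvLoopN.induct z (fun i => ∀ cnt : Int, pvLoopB (z : Int) (i : Int) cnt = cnt + (pvLoopN z i : Int)) ?_ ?_ i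
  · intro i h ih cnt
    rw [pvLoopB, dif_pos (by exact_mod_cast h)]
    rw [show ((i : Int) + 1) = ((i + 1 : Nat) : Int) by push_cast; ring, ih]
    conv_rhs => rw [pvLoopN, if_pos h]
    have hmod : PySem.Int.mod (z : Int) (i : Int) = ((z % i : Nat) : Int) :=
      PySem.Int.mod_natCast z i
    by_cases hdvd : z % i = 0
    · have hb1 : (PySem.Int.mod (z : Int) (i : Int) == 0) = true := by
        rw [hmod, beq_iff_eq]
        exact_mod_cast hdvd
      by_cases hsq : i * i = z
      · have hb2 : ((i : Int) * (i : Int) == (z : Int)) = true := by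
          rw [beq_iff_eq]
          exact_mod_cast hsq
        rw [hb1, hb2, if_pos hdvd, if_pos hsq]
        simp only [if_true]
        push_cast
        ring
      · have hb2 : ((i : Int) * (i : Int) == (z : Int)) = false := by
          rw [beq_eq_false_iff_ne]
          exact_mod_cast hsq
        rw [hb1, hb2, if_pos hdvd, if_neg hsq]
        simp only [if_true, Bool.false_eq_true, if_false]
        push_cast
        ring
    · have hb1 : (PySem.Int.mod (z : Int) (i : Int) == 0) = false := by
        rw [hmod, beq_eq_false_iff_ne]
        exact_mod_cast hdvd
      rw [hb1, if_neg hdvd]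
      simp only [Bool.false_eq_true, if_false]
      push_cast
      ring
  · intro i h cnt
    rw [pvLoopB, dif_neg (by exact_mod_cast h)]
    rw [pvLoopN, if_neg h]
    simp

lemma pvSumRange (n : Nat) :
    (PySem.List.pyRange 1 ((n : Int) + 1) 1).foldl (fun z i => z + i) 0 = ((n * (n + 1) / 2 : Nat) : Int) := by
  induction n with
  | zero =>
    rw [show ((0 : Nat) : Int) + 1 = 1 by norm_num, PySem.List.pyRange_one_eq_nil le_rfl]
    simp
  | succ m ih =>
    have hsplit : PySem.List.pyRange 1 (((m + 1 : Nat) : Int) + 1) 1 =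
        PySem.List.pyRange 1 ((m : Int) + 1) 1 ++ [((m : Int) + 1)] := by
      rw [show (((m + 1 : Nat) : Int) + 1) = ((m : Int) + 1) + 1 by push_cast; ring]
      exact PySem.List.pyRange_one_succ_right (by omega)
    rw [hsplit, List.foldl_append, ih]
    simp only [List.foldl_cons, List.foldl_nil]
    obtain ⟨k, hk⟩ := Nat.even_mul_succ_self m
    have h1 : m * (m + 1) / 2 = k := by omega
    have h2 : (m + 1) * (m + 1 + 1) = m * (m + 1) + 2 * (m + 1) := by ring
    have h3 : (m + 1) * (m + 1 + 1) / 2 = k + (m + 1) := by omega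
    rw [h1, h3]
    push_cast
    ring

-- ===== VERDICT (by name: the statement is the Claim_ definition above) =====
theorem NumberOfDivisorsofNthTriagngleNumber_spec : Claim_equal_NumberOfDivisorsofNthTriagngleNumber := by
  intro N _
  unfold Spec_NumberOfDivisorsofNthTriagngleNumber
  by_cases hN : N < 1
  · rw [NumberOfDivisorsofNthTriagngleNumber_alt, if_pos hN]
    rw [NumberOfDivisorsofNthTriagngleNumber]
    rw [PySem.List.pyRange_one_eq_nil (show N + 1 ≤ 1 by omega)]
    simp [PySem.List.pyRange_one_eq_nil (le_refl (1 : Int))]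
  · have hN1 : 1 ≤ N := by omega
    obtain ⟨n, rfl⟩ : ∃ n : Nat, N = (n : Int) := ⟨N.toNat, (Int.toNat_of_nonneg (by omega)).symm⟩
    have hn1 : 1 ≤ n := by exact_mod_cast hN1
    set z := n * (n + 1) / 2 with hzdef
    have h2n : 2 ≤ n * (n + 1) := by nlinarith
    have hz1 : 1 ≤ z := by omega
    have hA : NumberOfDivisorsofNthTriagngleNumber (n : Int) =
        ((((Finset.Icc 1 z).filter (fun d => d ∣ z)).card : Nat) : Int) := by
      rw [NumberOfDivisorsofNthTriagngleNumber]
      rw [pvSumRange n, ← hzdef]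
      rw [PySem.List.foldl_if_add_one]
      rw [PySem.List.pyRange_one]
      rw [show ((z : Int) + 1 - 1).toNat = z by omega]
      rw [List.countP_map]
      have hcong : ∀ k ∈ List.range z,
          (((fun i => PySem.Int.mod (z : Int) i == 0) ∘ (fun k : Nat => (1 : Int) + (k : Int))) k = true ↔
            (fun k : Nat => decide (z % (k + 1) = 0)) k = true) := by
        intro k _
        have hm : PySem.Int.mod (z : Int) ((1 : Int) + (k : Int)) = ((z % (k + 1) : Nat) : Int) := by
          rw [show ((1 : Int) + (k : Int)) = ((k + 1 : Nat) : Int) by push_cast; ring]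
          rw [PySem.Int.mod_natCast]
        simp [Function.comp, hm]
        rw [show ((k : Int) + 1) = ((k + 1 : Nat) : Int) by push_cast; ring,
          Int.natCast_dvd_natCast]
        exact ⟨Nat.mod_eq_zero_of_dvd, Nat.dvd_of_mod_eq_zero⟩
      rw [List.countP_congr hcong]
      rw [pvCountA z z le_rfl]
      simp
    have hB : NumberOfDivisorsofNthTriagngleNumber_alt (n : Int) =
        ((((Finset.Icc 1 z).filter (fun d => d ∣ z)).card : Nat) : Int) := by
      rw [NumberOfDivisorsofNthTriagngleNumber_alt, if_neg hN]
      rw [show ((n : Int) * ((n : Int) + 1)) = ((n * (n + 1) : Nat) : Int) by push_cast; ring]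
      rw [show (2 : Int) = ((2 : Nat) : Int) by norm_num]
      rw [PySem.Int.floordiv_natCast, ← hzdef]
      have hloop := pvLoopB_eq z 1 0
      rw [Nat.cast_one] at hloop
      rw [hloop, pvLoopN_eq_card z 1 le_rfl hz1, pvT_one z hz1]
      simp
    rw [hA, hB]
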